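-- pv_equiv track=rewrite | github.com/guillecampoy/UTN-TUaD-Integrador-Dos-Matematicas | TP_Integrador_Matematicas_2B.py | contar_pares_impares
-- ===== SOURCE A (Python) =====
-- def contar_pares_impares(aniosLista):
--     pares = 0
--     impares = 0
--
--     for anio in aniosLista:
--         if(anio %2 == 0):
--             pares+=1
--         else:
--             impares+=1
--
--     return pares, impares
-- ===== SOURCE B (Python) =====
-- def contar_pares_impares(aniosLista):
--     # divide-and-conquer over index ranges: count a half, combine the counts
--     def go(lo, hi):
--         if lo == hi:
--             return (0, 0)
--         if hi - lo == 1: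
--             return (1, 0) if aniosLista[lo] % 2 == 0 else (0, 1)
--         mid = (lo + hi) // 2
--         p1, i1 = go(lo, mid)
--         p2, i2 = go(mid, hi)
--         return (p1 + p2, i1 + i2)
--     return go(0, len(aniosLista))
-- ===== Notes on version B (the rewrite author's own statement) =====
-- stated objective: alternative
-- what changed: Replaces the single accumulation loop with two counters by a recursive divide-and-conquer over index ranges (base case: one element's parity; combine: pairwise sum of the two halves' counts), same O(n) work at O(log n) depth.
import Mathlib
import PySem

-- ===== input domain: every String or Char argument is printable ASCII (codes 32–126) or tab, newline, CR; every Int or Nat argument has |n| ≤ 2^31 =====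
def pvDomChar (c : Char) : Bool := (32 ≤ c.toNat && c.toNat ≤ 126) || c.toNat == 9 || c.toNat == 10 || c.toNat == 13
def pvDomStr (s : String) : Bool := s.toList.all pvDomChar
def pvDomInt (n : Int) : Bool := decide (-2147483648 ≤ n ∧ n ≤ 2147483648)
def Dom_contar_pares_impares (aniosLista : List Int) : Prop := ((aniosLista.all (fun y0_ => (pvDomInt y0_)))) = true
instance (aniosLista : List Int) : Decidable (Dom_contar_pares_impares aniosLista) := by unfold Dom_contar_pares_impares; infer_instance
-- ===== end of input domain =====

-- B replaces the two-counter loop by a divide-and-conquer recursion over index ranges (alternative decomposition, same cost).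

-- ===== PORT A =====
-- literal port of A: one loop, two counters, if/else on anio % 2 == 0
def contar_pares_impares (aniosLista : List Int) : Int × Int :=
  let st := aniosLista.foldl
    (fun (st : Int × Int) anio =>
      if PySem.Int.mod anio 2 == 0 then (st.1 + 1, st.2) else (st.1, st.2 + 1))
    (0, 0)
  (st.1, st.2)

-- ===== PORT B =====
-- literal port of B's inner go(lo, hi). The extra `fuel` (started at hi - lo) is only a
-- totality guard for Lean's termination checker: each recursive range is strictly shorter,
-- so the 0-fuel branch is never reached on B's actual calls. Python's (lo+hi)//2 on
-- nonnegative ints equals Nat division; aniosLista[lo] is exact as getD because go only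
-- reads it with lo < hi <= len(aniosLista).
def contar_pares_impares_go (xs : List Int) : Nat -> Nat -> Nat -> Int × Int
  | 0, _, _ => (0, 0)
  | fuel + 1, lo, hi =>
    if lo == hi then (0, 0)
    else if hi - lo == 1 then
      (if PySem.Int.mod (xs.getD lo 0) 2 == 0 then (1, 0) else (0, 1))
    else
      let mid := (lo + hi) / 2
      let l := contar_pares_impares_go xs fuel lo mid
      let r := contar_pares_impares_go xs fuel mid hi
      (l.1 + r.1, l.2 + r.2)

def contar_pares_impares_alt (aniosLista : List Int) : Int × Int :=
  contar_pares_impares_go aniosLista aniosLista.length 0 aniosLista.length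

-- ===== PRECONDITION & SPEC =====
def Spec_contar_pares_impares (aniosLista : List Int) (out : Int × Int) : Prop := out = contar_pares_impares_alt aniosLista
instance (aniosLista : List Int) (out : Int × Int) : Decidable (Spec_contar_pares_impares aniosLista out) := by unfold Spec_contar_pares_impares; infer_instance

-- ===== CLAIM (what is proved, stated in full; the proofs are below) =====
def Claim_equal_contar_pares_impares : Prop := ∀ (aniosLista : List Int), Dom_contar_pares_impares aniosLista → Spec_contar_pares_impares aniosLista (contar_pares_impares aniosLista)

-- ===== LEMMAS AND PROOFS =====
-- the counting function both sides compute
def cpiCount (xs : List Int) : Int × Int :=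
  (((xs.filter (fun a => PySem.Int.mod a 2 == 0)).length : Int),
   ((xs.filter (fun a => !(PySem.Int.mod a 2 == 0))).length : Int))

theorem cpiCount_append (xs ys : List Int) :
    cpiCount (xs ++ ys) = ((cpiCount xs).1 + (cpiCount ys).1, (cpiCount xs).2 + (cpiCount ys).2) := by
  simp [cpiCount]

theorem contar_foldl (xs : List Int) (p i : Int) :
    xs.foldl
      (fun (st : Int × Int) anio =>
        if PySem.Int.mod anio 2 == 0 then (st.1 + 1, st.2) else (st.1, st.2 + 1))
      (p, i)
    = (p + (cpiCount xs).1, i + (cpiCount xs).2) := by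
  induction xs generalizing p i with
  | nil => simp [cpiCount]
  | cons a xs ih =>
    by_cases h : (PySem.Int.mod a 2 == 0) = true <;>
      simp only [List.foldl_cons, cpiCount, List.filter_cons, h, if_pos, if_neg,
        Bool.not_true, Bool.not_false, Bool.false_eq_true, not_false_eq_true, ih,
        List.length_cons, Prod.mk.injEq] <;>
      constructor <;> push_cast <;> ring

theorem cpi_go_eq (xs : List Int) (fuel lo hi : Nat) (hle : lo ≤ hi) (hlen : hi ≤ xs.length)
    (hfuel : hi - lo ≤ fuel) :
    contar_pares_impares_go xs fuel lo hi = cpiCount ((xs.drop lo).take (hi - lo)) := by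
  induction fuel generalizing lo hi with
  | zero =>
    have : lo = hi := by omega
    simp [contar_pares_impares_go, this, cpiCount]
  | succ fuel ih =>
    rw [contar_pares_impares_go]
    by_cases h0 : lo = hi
    · simp [h0, cpiCount]
    · have hlt : lo < hi := lt_of_le_of_ne hle h0
      have hlo : lo < xs.length := lt_of_lt_of_le hlt hlen
      by_cases h1 : hi - lo = 1
      · have hgetE : (xs.drop lo).take 1 = [xs.getD lo 0] := by
          rw [List.getD_eq_getElem xs 0 hlo, List.drop_eq_getElem_cons hlo,
            List.take_succ_cons, List.take_zero]
        simp only [beq_iff_eq, if_neg h0, h1, hgetE, cpiCount,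
          List.filter_cons, List.filter_nil]
        split_ifs <;> simp_all
      · have hmid2 : 2 * ((lo + hi) / 2) + (lo + hi) % 2 = lo + hi := by omega
        have hm2 : (lo + hi) % 2 < 2 := Nat.mod_lt _ (by omega)
        have hmidlt : (lo + hi) / 2 < hi := by omega
        have hmidgt : lo < (lo + hi) / 2 := by omega
        simp only [beq_iff_eq, if_neg h0, if_neg h1]
        rw [ih lo ((lo + hi) / 2) (by omega) (by omega) (by omega),
            ih ((lo + hi) / 2) hi (by omega) hlen (by omega)]
        have hdd : xs.drop ((lo + hi) / 2) = (xs.drop lo).drop ((lo + hi) / 2 - lo) := by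
          rw [List.drop_drop]; congr 1; omega
        have hsplit : (xs.drop lo).take (hi - lo)
            = (xs.drop lo).take ((lo + hi) / 2 - lo)
              ++ (xs.drop ((lo + hi) / 2)).take (hi - (lo + hi) / 2) := by
          rw [hdd, ← List.take_add]; congr 1; omega
        rw [hsplit, cpiCount_append]

-- ===== VERDICT (by name: the statement is the Claim_ definition above) =====
theorem contar_pares_impares_spec : Claim_equal_contar_pares_impares := by
  intro xs _
  unfold Spec_contar_pares_impares contar_pares_impares contar_pares_impares_alt
  rw [cpi_go_eq xs xs.length 0 xs.length (Nat.zero_le _) le_rfl (by omega), contar_foldl]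
  simp
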